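-- pv_equiv track=rewrite | github.com/z1ko/crisprme | exploration.py | create_diag_sizes
-- ===== SOURCE A (Python) =====
-- def create_diag_sizes(L):
--     result = []
--
--     window_size = len(L)
--     L_new = [0] * (window_size - 1) + L
--     L_new = L_new + [0] * (window_size - 1)
--
--     for i in range(0, len(L_new) - window_size + 1):
--         result.append(sum(L_new[i:i+window_size]))
--
--     return result
-- ===== SOURCE B (Python) =====
-- def create_diag_sizes(L):
--     n = len(L)
--     prefix = [0]
--     for x in L:
--         prefix.append(prefix[-1] + x)
--     m = 2 * max(n - 1, 0) + 1
--     return [prefix[min(i + 1, n)] - prefix[min(max(i - n + 1, 0), n)] for i in range(m)]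
-- ===== Notes on version B (the rewrite author's own statement) =====
-- stated objective: faster
-- what changed: Replaced re-summing each length-n window of the zero-padded list (sum of a fresh slice per position) by one prefix-sum array over L alone, each window sum becoming a difference of two clamped prefix sums; no padded list is built.
import Mathlib
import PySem

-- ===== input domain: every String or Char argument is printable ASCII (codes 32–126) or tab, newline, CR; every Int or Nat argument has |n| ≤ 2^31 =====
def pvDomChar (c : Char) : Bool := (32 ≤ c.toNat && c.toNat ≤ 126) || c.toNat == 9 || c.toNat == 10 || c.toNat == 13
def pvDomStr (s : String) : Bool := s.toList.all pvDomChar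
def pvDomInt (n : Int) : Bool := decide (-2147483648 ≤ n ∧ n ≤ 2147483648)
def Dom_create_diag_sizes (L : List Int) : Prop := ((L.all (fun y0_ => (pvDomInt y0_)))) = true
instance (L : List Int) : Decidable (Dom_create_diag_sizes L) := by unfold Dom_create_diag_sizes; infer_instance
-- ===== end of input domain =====

-- B replaces A's per-position re-summing of length-n windows of the zero-padded list by a
-- single prefix-sum pass over L (each window sum = difference of two clamped prefix sums): O(n) vs O(n^2).


-- ===== PORT A =====
def create_diag_sizes (L : List Int) : List Int :=
  let window_size := L.length
  let L_new := List.replicate (window_size - 1) (0 : Int) ++ L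
  let L_new2 := L_new ++ List.replicate (window_size - 1) (0 : Int)
  (PySem.List.pyRange 0 ((L_new2.length : Int) - (window_size : Int) + 1) 1).foldl
    (fun result i =>
      result ++ [(PySem.List.slice L_new2 (some i) (some (i + (window_size : Int)))).sum]) []

-- ===== PORT B =====
def create_diag_sizes_alt (L : List Int) : List Int :=
  let n : Int := L.length
  let pre := L.foldl (fun p x => p ++ [PySem.List.pyGetD p (-1) 0 + x]) [(0 : Int)]
  let m : Int := 2 * max (n - 1) 0 + 1
  (PySem.List.pyRange 0 m 1).map (fun i =>
    PySem.List.pyGetD pre (min (i + 1) n) 0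
      - PySem.List.pyGetD pre (min (max (i - n + 1) 0) n) 0)

-- ===== PRECONDITION & SPEC =====
def Spec_create_diag_sizes (L : List Int) (out : List Int) : Prop := out = create_diag_sizes_alt L
instance (L : List Int) (out : List Int) : Decidable (Spec_create_diag_sizes L out) := by unfold Spec_create_diag_sizes; infer_instance

-- ===== CLAIM (what is proved, stated in full; the proofs are below) =====
def Claim_equal_create_diag_sizes : Prop := ∀ (L : List Int), Dom_create_diag_sizes L → Spec_create_diag_sizes L (create_diag_sizes L)

-- ===== LEMMAS AND PROOFS =====

-- B's running-total fold builds exactly the list of prefix sums.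
theorem prefix_fold (xs : List Int) (p : List Int) (s : Int) :
    xs.foldl (fun p x => p ++ [PySem.List.pyGetD p (-1) 0 + x]) (p ++ [s])
      = p ++ [s] ++ (List.range xs.length).map (fun j => s + (xs.take (j + 1)).sum) := by
  induction xs generalizing p s with
  | nil => simp
  | cons x xs ih =>
    simp only [List.foldl_cons, PySem.List.pyGetD_neg_one_append_singleton]
    rw [show p ++ [s] ++ [s + x] = (p ++ [s]) ++ [s + x] by simp] at *
    rw [ih (p ++ [s]) (s + x)]
    simp [List.range_succ_eq_map, List.map_map, Function.comp, add_assoc]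

theorem prefix_eq (L : List Int) :
    L.foldl (fun p x => p ++ [PySem.List.pyGetD p (-1) 0 + x]) [(0 : Int)]
      = (List.range (L.length + 1)).map (fun j => (L.take j).sum) := by
  have := prefix_fold L [] 0
  simp at this
  rw [this, List.range_succ_eq_map]
  simp [List.map_map, Function.comp]

-- prefix sums of the padded list, in terms of prefix sums of L (Nat subtraction clamps like the padding)
theorem take_pad_sum (L : List Int) (p j : Nat) :
    (((List.replicate p (0 : Int) ++ L ++ List.replicate p 0).take j)).sum
      = (L.take (j - p)).sum := by
  rw [List.append_assoc, List.take_append, List.take_append]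
  simp

-- a window of the padded list as a difference of prefix sums of the padded list
theorem window_sum (xs : List Int) (a n : Nat) :
    ((xs.drop a).take n).sum = (xs.take (a + n)).sum - (xs.take a).sum := by
  rw [List.take_add, List.sum_append]
  ring

-- ===== VERDICT (by name: the statement is the Claim_ definition above) =====
theorem create_diag_sizes_spec : Claim_equal_create_diag_sizes := by
  intro L _
  show create_diag_sizes L = create_diag_sizes_alt L
  rcases L with _ | ⟨x, xs⟩
  · decide
  · set L := x :: xs with hL
    have hn : 1 ≤ L.length := by simp [hL]
    unfold create_diag_sizes create_diag_sizes_alt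
    rw [PySem.List.foldl_append_singleton_eq_map, prefix_eq]
    simp only [List.nil_append]
    have hlen : ((List.replicate (L.length - 1) (0:Int) ++ L ++ List.replicate (L.length - 1) 0).length : Int)
        - (L.length : Int) + 1 = 2 * max ((L.length : Int) - 1) 0 + 1 := by
      simp [List.length_append]
      omega
    rw [hlen]
    apply List.map_congr_left
    intro i hi
    rw [PySem.List.mem_pyRange_one] at hi
    obtain ⟨hi0, hi1⟩ := hi
    set n := L.length with hn'
    set pad := List.replicate (n - 1) (0:Int) ++ L ++ List.replicate (n - 1) 0 with hpad
    -- bounds on i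
    have hiN : i = ((i.toNat : Nat) : Int) := (Int.toNat_of_nonneg hi0).symm
    set a := i.toNat with ha
    have hi1' : a < 2 * n - 1 := by omega
    -- left side: slice → drop/take
    have hslice : PySem.List.slice pad (some i) (some (i + (n : Int)))
        = (pad.drop a).take n := by
      rw [hiN, show ((a : Int) + (n : Int)) = ((a + n : Nat) : Int) by push_cast; ring,
        PySem.List.slice_natCast]
      simp
    rw [hslice, window_sum, take_pad_sum, take_pad_sum]
    -- right side: pyGetD on the prefix-sum list
    have hlenpre : ((List.range (n + 1)).map (fun j => (L.take j).sum)).length = n + 1 := by simp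
    have key : ∀ (k : Int), 0 ≤ k → k ≤ (n : Int) →
        PySem.List.pyGetD ((List.range (n + 1)).map (fun j => (L.take j).sum)) k 0
          = (L.take k.toNat).sum := by
      intro k hk0 hkn
      rw [PySem.List.pyGetD_eq_getElem _ _ hk0 (by simp; omega)]
      simp
    rw [key _ (by positivity) (by omega), key _ (by omega) (by omega)]
    congr 1
    · congr 1
      rw [show a + n - (n - 1) = a + 1 from by omega,
        show (min (i + 1) (n : Int)).toNat = min (a + 1) n from by omega]
      rcases le_total (a + 1) n with h | h
      · rw [Nat.min_eq_left h]
      · rw [Nat.min_eq_right h, List.take_of_length_le (by omega), List.take_of_length_le (by omega)]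
    · congr 2
      omega
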